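-- pv_equiv track=rewrite | github.com/vig2306/leetcode | 2533-bitwise-xor-of-all-pairings/bitwise-xor-of-all-pairings.py | xorAllNums
-- ===== SOURCE A (Python) =====
-- from typing import List
--
-- def xorAllNums(nums1: List[int], nums2: List[int]) -> int:
--     n = len(nums1)
--     m = len(nums2)
--     res = 0
--     if m%2 != 0:
--         for i in range(n):
--             res = res ^ nums1[i]
--
--     if n%2 != 0:
--         for j in range(m):
--             res = res ^ nums2[j]
--
--     return res
-- ===== SOURCE B (Python) =====
-- from typing import List
--
-- def xorAllNums(nums1: List[int], nums2: List[int]) -> int: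
--     res = 0
--     for a in nums1:
--         for b in nums2:
--             res ^= a ^ b
--     return res
-- ===== Notes on version B (the rewrite author's own statement) =====
-- stated objective: alternative
-- what changed: B computes the XOR of every pairing directly with a nested loop (the naive definition), instead of A's parity shortcut that XORs each array only when the other array's length is odd.
import Mathlib
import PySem

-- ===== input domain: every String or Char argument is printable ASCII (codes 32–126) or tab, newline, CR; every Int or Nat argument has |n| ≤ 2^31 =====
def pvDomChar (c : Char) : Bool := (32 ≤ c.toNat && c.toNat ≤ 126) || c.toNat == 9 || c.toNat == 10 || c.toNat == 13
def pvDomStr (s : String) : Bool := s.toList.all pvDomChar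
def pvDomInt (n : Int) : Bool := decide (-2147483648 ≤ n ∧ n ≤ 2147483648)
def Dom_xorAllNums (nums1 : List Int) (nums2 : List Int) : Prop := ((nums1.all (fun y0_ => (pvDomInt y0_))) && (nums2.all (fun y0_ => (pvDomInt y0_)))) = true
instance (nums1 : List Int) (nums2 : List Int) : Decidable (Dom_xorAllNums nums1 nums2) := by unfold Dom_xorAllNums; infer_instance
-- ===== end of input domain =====

-- B replaces A's parity shortcut by the direct nested-loop XOR of every pairing (alternative decomposition, not faster).

-- ===== PORT A =====
def xorAllNums (nums1 : List Int) (nums2 : List Int) : Int :=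
  let n := nums1.length
  let m := nums2.length
  let res : Int := 0
  let res := if m % 2 ≠ 0 then
      (PySem.List.pyRange 0 (n : Int) 1).foldl
        (fun res i => PySem.Int.bxor res (PySem.List.pyGetD nums1 i 0)) res
    else res
  let res := if n % 2 ≠ 0 then
      (PySem.List.pyRange 0 (m : Int) 1).foldl
        (fun res j => PySem.Int.bxor res (PySem.List.pyGetD nums2 j 0)) res
    else res
  res

-- ===== PORT B =====
def xorAllNums_alt (nums1 : List Int) (nums2 : List Int) : Int :=
  nums1.foldl
    (fun res a => nums2.foldl (fun r b => PySem.Int.bxor r (PySem.Int.bxor a b)) res)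
    0

-- ===== PRECONDITION & SPEC =====
def Spec_xorAllNums (nums1 : List Int) (nums2 : List Int) (out : Int) : Prop := out = xorAllNums_alt nums1 nums2
instance (nums1 : List Int) (nums2 : List Int) (out : Int) : Decidable (Spec_xorAllNums nums1 nums2 out) := by unfold Spec_xorAllNums; infer_instance

-- ===== CLAIM (what is proved, stated in full; the proofs are below) =====
def Claim_equal_xorAllNums : Prop := ∀ (nums1 : List Int) (nums2 : List Int), Dom_xorAllNums nums1 nums2 → Spec_xorAllNums nums1 nums2 (xorAllNums nums1 nums2)

-- ===== LEMMAS AND PROOFS =====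

-- bxor on the four sign shapes
theorem bxor_ofNat_negSucc (m n : Nat) :
    PySem.Int.bxor (m : Int) (Int.negSucc n) = Int.negSucc (m ^^^ n) := by
  simp [PySem.Int.bxor, Int.negSucc_eq]
  omega

theorem bxor_negSucc_ofNat (m n : Nat) :
    PySem.Int.bxor (Int.negSucc m) (n : Int) = Int.negSucc (m ^^^ n) := by
  simp [PySem.Int.bxor, Int.negSucc_eq]
  omega

theorem bxor_negSucc_negSucc (m n : Nat) :
    PySem.Int.bxor (Int.negSucc m) (Int.negSucc n) = ((m ^^^ n : Nat) : Int) := by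
  have h1 : ¬ (0 : Int) ≤ Int.negSucc m := by omega
  have h2 : ¬ (0 : Int) ≤ Int.negSucc n := by omega
  simp [PySem.Int.bxor, h1, h2]

theorem bxor_assoc (a b c : Int) :
    PySem.Int.bxor (PySem.Int.bxor a b) c = PySem.Int.bxor a (PySem.Int.bxor b c) := by
  rcases a with m | m <;> rcases b with n | n <;> rcases c with k | k <;>
    simp [Int.ofNat_eq_natCast, bxor_ofNat_negSucc,
      bxor_negSucc_ofNat, bxor_negSucc_negSucc, Nat.xor_assoc]

theorem zero_bxor (a : Int) : PySem.Int.bxor 0 a = a := by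
  rw [PySem.Int.bxor_comm, PySem.Int.bxor_zero]

theorem bxor_right_comm (s a b : Int) :
    PySem.Int.bxor (PySem.Int.bxor s a) b = PySem.Int.bxor (PySem.Int.bxor s b) a := by
  rw [bxor_assoc, PySem.Int.bxor_comm a b, ← bxor_assoc]

-- pulling an accumulator term out of a bare xor-fold
theorem foldl_bxor_out (l : List Int) : ∀ (s a : Int),
    l.foldl PySem.Int.bxor (PySem.Int.bxor s a)
      = PySem.Int.bxor (l.foldl PySem.Int.bxor s) a := by
  induction l with
  | nil => intro s a; rfl
  | cons b t ih =>
    intro s a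
    simp only [List.foldl_cons]
    rw [bxor_right_comm, ih]

theorem foldl_bxor_zero (l : List Int) (s : Int) :
    l.foldl PySem.Int.bxor s = PySem.Int.bxor s (l.foldl PySem.Int.bxor 0) := by
  have h : s = PySem.Int.bxor 0 s := (zero_bxor s).symm
  rw [h, foldl_bxor_out, zero_bxor, PySem.Int.bxor_comm]

-- B's inner loop: xoring (a ^ b) over all b of l
theorem inner_loop (l : List Int) : ∀ (s a : Int),
    l.foldl (fun r b => PySem.Int.bxor r (PySem.Int.bxor a b)) s
      = PySem.Int.bxor (l.foldl PySem.Int.bxor s)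
          (if l.length % 2 = 1 then a else 0) := by
  induction l with
  | nil => intro s a; simp [PySem.Int.bxor_zero]
  | cons b t ih =>
    intro s a
    simp only [List.foldl_cons, List.length_cons]
    have hstep : PySem.Int.bxor s (PySem.Int.bxor a b)
        = PySem.Int.bxor (PySem.Int.bxor s b) a := by
      rw [← bxor_assoc, bxor_right_comm]
    rw [hstep, ih, foldl_bxor_out]
    by_cases h : t.length % 2 = 1
    · have h' : ¬ (t.length + 1) % 2 = 1 := by omega
      rw [if_pos h, if_neg h', bxor_assoc, PySem.Int.bxor_self,
          PySem.Int.bxor_zero]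
    · have h' : (t.length + 1) % 2 = 1 := by omega
      rw [if_neg h, if_pos h', PySem.Int.bxor_zero]

-- B's outer loop, case: nums2 has odd length (each step xors in X2 and a)
theorem outer_odd (l : List Int) (c : Int) : ∀ (s : Int),
    l.foldl (fun r a => PySem.Int.bxor (PySem.Int.bxor r c) a) s
      = PySem.Int.bxor (if l.length % 2 = 1 then PySem.Int.bxor s c else s)
          (l.foldl PySem.Int.bxor 0) := by
  induction l with
  | nil => intro s; simp [PySem.Int.bxor_zero]
  | cons b t ih =>
    intro s
    simp only [List.foldl_cons, List.length_cons]
    rw [ih, foldl_bxor_zero t (PySem.Int.bxor 0 b), zero_bxor]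
    by_cases h : t.length % 2 = 1
    · have h' : ¬ (t.length + 1) % 2 = 1 := by omega
      rw [if_pos h, if_neg h',
          bxor_right_comm (PySem.Int.bxor s c) b c, bxor_assoc s c c,
          PySem.Int.bxor_self, PySem.Int.bxor_zero, bxor_assoc]
    · have h' : (t.length + 1) % 2 = 1 := by omega
      rw [if_neg h, if_pos h', bxor_assoc]

-- B's outer loop, case: nums2 has even length (each step only xors in X2)
theorem outer_even (l : List Int) (c : Int) : ∀ (s : Int),
    l.foldl (fun r _ => PySem.Int.bxor r c) s
      = if l.length % 2 = 1 then PySem.Int.bxor s c else s := by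
  induction l with
  | nil => intro s; simp
  | cons b t ih =>
    intro s
    simp only [List.foldl_cons, List.length_cons]
    rw [ih]
    by_cases h : t.length % 2 = 1
    · have h' : ¬ (t.length + 1) % 2 = 1 := by omega
      rw [if_pos h, if_neg h', bxor_assoc, PySem.Int.bxor_self, PySem.Int.bxor_zero]
    · have h' : (t.length + 1) % 2 = 1 := by omega
      rw [if_neg h, if_pos h']

-- A's range-indexed loops are bare xor-folds over the lists
theorem range_fold_eq (xs : List Int) (s : Int) :
    (PySem.List.pyRange 0 (xs.length : Int) 1).foldl
        (fun res i => PySem.Int.bxor res (PySem.List.pyGetD xs i 0)) s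
      = xs.foldl PySem.Int.bxor s := by
  have h := PySem.List.foldl_pyRange_pyGetD (f := PySem.Int.bxor) (xs := xs)
      (a := 0) (d := 0) (init := s) (by omega)
  simpa [PySem.List.len] using h

theorem main_eq (nums1 nums2 : List Int) :
    xorAllNums nums1 nums2 = xorAllNums_alt nums1 nums2 := by
  simp only [xorAllNums, xorAllNums_alt, range_fold_eq]
  by_cases hm : nums2.length % 2 = 1
  · have hB : (fun (res a : Int) =>
          nums2.foldl (fun r b => PySem.Int.bxor r (PySem.Int.bxor a b)) res)
        = (fun res a => PySem.Int.bxor (PySem.Int.bxor res (nums2.foldl PySem.Int.bxor 0)) a) := by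
      funext res a
      rw [inner_loop, if_pos hm, foldl_bxor_zero]
    rw [hB, outer_odd, if_pos (show nums2.length % 2 ≠ 0 by omega)]
    by_cases hn : nums1.length % 2 = 1
    · rw [if_pos hn, if_pos (show nums1.length % 2 ≠ 0 by omega),
          foldl_bxor_zero nums2, zero_bxor, PySem.Int.bxor_comm]
    · rw [if_neg hn, if_neg (show ¬ nums1.length % 2 ≠ 0 by omega), zero_bxor]
  · have hB : (fun (res a : Int) =>
          nums2.foldl (fun r b => PySem.Int.bxor r (PySem.Int.bxor a b)) res)
        = (fun (res _ : Int) => PySem.Int.bxor res (nums2.foldl PySem.Int.bxor 0)) := by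
      funext res a
      rw [inner_loop, if_neg hm, PySem.Int.bxor_zero, foldl_bxor_zero]
    rw [hB, outer_even, if_neg (show ¬ nums2.length % 2 ≠ 0 by omega)]
    by_cases hn : nums1.length % 2 = 1
    · rw [if_pos hn, if_pos (show nums1.length % 2 ≠ 0 by omega), zero_bxor]
    · rw [if_neg hn, if_neg (show ¬ nums1.length % 2 ≠ 0 by omega)]

-- ===== VERDICT (by name: the statement is the Claim_ definition above) =====
theorem xorAllNums_spec : Claim_equal_xorAllNums := by
  intro nums1 nums2 _
  unfold Spec_xorAllNums
  exact main_eq nums1 nums2
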